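-- pv_equiv track=rewrite | github.com/adam147g/algorithms-and-data-structures | Exams/egzamin probny/egzP5ab/egzP5a/egzP5a - O(n^2).py | f
-- ===== SOURCE A (Python) =====
-- def f(i, j, DP, T):
--     if DP[i][j] != -1:
--         return DP[i][j]
--     if i == j:
--         DP[i][j] = T[i]
--     else:
--         DP[i][j] = min(T[j], f(i, j - 1, DP, T))
--     return DP[i][j]
-- ===== SOURCE B (Python) =====
-- def f(i, j, DP, T):
--     # Iterative fill of the same memo table: scan down to the first memoized
--     # entry (or the base i), then accumulate the running minimum back up to j.
--     if DP[i][j] != -1: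
--         return DP[i][j]
--     k = j
--     while k > i and DP[i][k] == -1:
--         k -= 1
--     if DP[i][k] != -1:
--         val = DP[i][k]
--     else:
--         val = T[i]
--         DP[i][i] = val
--     for m in range(k + 1, j + 1):
--         val = min(T[m], val)
--         DP[i][m] = val
--     return val
-- ===== Notes on version B (the rewrite author's own statement) =====
-- stated objective: alternative
-- what changed: Replaces the memoized recursion by an iterative loop: scan down from j to the first memoized entry (or the base i), then accumulate the running minimum upward, performing the same DP writes.
-- outside the precondition, e.g. on f(1, 0, [[0, 0], [-1, 8]], [5]): A returns 5, B raises IndexError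
import Mathlib
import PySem

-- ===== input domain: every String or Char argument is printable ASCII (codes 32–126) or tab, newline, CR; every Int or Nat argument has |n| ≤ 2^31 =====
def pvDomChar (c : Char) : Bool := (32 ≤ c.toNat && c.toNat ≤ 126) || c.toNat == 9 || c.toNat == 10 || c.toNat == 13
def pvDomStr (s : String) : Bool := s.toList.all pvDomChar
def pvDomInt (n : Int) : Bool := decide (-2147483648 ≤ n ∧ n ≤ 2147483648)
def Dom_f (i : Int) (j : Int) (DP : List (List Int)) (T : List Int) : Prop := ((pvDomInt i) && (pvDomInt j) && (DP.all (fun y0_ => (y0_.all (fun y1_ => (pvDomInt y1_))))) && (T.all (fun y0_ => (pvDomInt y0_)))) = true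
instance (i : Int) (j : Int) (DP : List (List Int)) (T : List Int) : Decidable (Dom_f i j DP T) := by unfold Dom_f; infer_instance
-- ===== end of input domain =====

-- B replaces the memoized recursion by an iterative scan-down/accumulate-up loop over the same
-- memo table (alternative decomposition). Both Pythons mutate DP identically; the equivalence
-- proved here is about the RETURN value.

-- ===== PORT A =====
-- DP[i][j] (Python indexing; none = IndexError, excluded by Pre_f, default 0 unreachable there)
def dpGet (DP : List (List Int)) (i j : Int) : Int :=
  match PySem.List.pyGet? DP i with
  | none => 0
  | some row => (PySem.List.pyGet? row j).getD 0

-- T[k] (Python indexing; out-of-range excluded by Pre_f)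
def tGet (T : List Int) (k : Int) : Int := (PySem.List.pyGet? T k).getD 0

-- A's recursion; fuel = (j - i).toNat suffices on Pre_f (the recursion steps j down towards i)
def fA : Nat → Int → Int → List (List Int) → List Int → Int
  | fuel, i, j, DP, T =>
    let d := dpGet DP i j
    if d ≠ -1 then d
    else if i = j then tGet T i
    else match fuel with
      | 0 => 0
      | n + 1 => min (tGet T j) (fA n i (j - 1) DP T)

def f (i : Int) (j : Int) (DP : List (List Int)) (T : List Int) : Int :=
  fA ((j - i).toNat) i j DP T

-- ===== PORT B =====
-- the while loop: scan k downward while k > i and DP[i][k] == -1 (fuel = (k - i).toNat suffices)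
def bScan : Nat → Int → Int → List (List Int) → Int
  | fuel, i, k, DP =>
    if k > i ∧ dpGet DP i k = -1 then
      match fuel with
      | 0 => k
      | n + 1 => bScan n i (k - 1) DP
    else k

def f_alt (i : Int) (j : Int) (DP : List (List Int)) (T : List Int) : Int :=
  let d := dpGet DP i j
  if d ≠ -1 then d
  else
    let k := bScan ((j - i).toNat) i j DP
    let dk := dpGet DP i k
    let v0 := if dk ≠ -1 then dk else tGet T i
    (PySem.List.pyRange (k + 1) (j + 1) 1).foldl (fun v m => min (tGet T m) v) v0

-- ===== PRECONDITION & SPEC =====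
-- Pre_f: either DP[i][j] is an in-range memoized entry (≠ -1, so A returns it at once), or
-- i ≤ j with every index of i..j in Python range (negative wraparound allowed) for DP's row i
-- and for T.  Excluded: inputs where A raises or recurses forever, and i > j inputs on which
-- A still returns only through negative-index wraparound below the row start.
def Pre_f (i : Int) (j : Int) (DP : List (List Int)) (T : List Int) : Prop :=
  (((PySem.List.pyGet? DP i).bind (fun row => PySem.List.pyGet? row j)).getD (-1) ≠ -1) ∨
  (i ≤ j ∧ -(DP.length : Int) ≤ i ∧ i < (DP.length : Int) ∧
   -((((PySem.List.pyGet? DP i).getD []).length : Int)) ≤ i ∧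
   j < ((((PySem.List.pyGet? DP i).getD []).length : Int)) ∧
   -(T.length : Int) ≤ i ∧ j < (T.length : Int))
instance (i : Int) (j : Int) (DP : List (List Int)) (T : List Int) : Decidable (Pre_f i j DP T) := by unfold Pre_f; infer_instance

def pvWitness_f : Int × Int × List (List Int) × List Int := (0, 1, [[-1, -1], [-1, -1]], [3, 2])

def Spec_f (i : Int) (j : Int) (DP : List (List Int)) (T : List Int) (out : Int) : Prop := out = f_alt i j DP T
instance (i : Int) (j : Int) (DP : List (List Int)) (T : List Int) (out : Int) : Decidable (Spec_f i j DP T out) := by unfold Spec_f; infer_instance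

-- ===== CLAIM (what is proved, stated in full; the proofs are below) =====
def Claim_equal_f : Prop := ∀ (i : Int) (j : Int) (DP : List (List Int)) (T : List Int), Dom_f i j DP T → Pre_f i j DP T → Spec_f i j DP T (f i j DP T)

-- ===== LEMMAS AND PROOFS =====

theorem bScan_stop (n : Nat) (i k : Int) (DP : List (List Int))
    (h : ¬ (k > i ∧ dpGet DP i k = -1)) : bScan n i k DP = k := by
  cases n <;> simp [bScan, h]

theorem bScan_succ (n : Nat) (i k : Int) (DP : List (List Int))
    (h : k > i ∧ dpGet DP i k = -1) : bScan (n + 1) i k DP = bScan n i (k - 1) DP := by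
  simp [bScan, h]

theorem bScan_le (n : Nat) (i k : Int) (DP : List (List Int)) : bScan n i k DP ≤ k := by
  induction n generalizing k with
  | zero => by_cases h : k > i ∧ dpGet DP i k = -1 <;> simp [bScan, h]
  | succ n ih =>
    by_cases h : k > i ∧ dpGet DP i k = -1
    · rw [bScan_succ n i k DP h]
      have := ih (k - 1)
      omega
    · rw [bScan_stop _ _ _ _ h]

-- main lemma: with fuel exactly (j - i).toNat, A's recursion equals B's loop, for all i ≤ j
theorem fA_eq_alt (n : Nat) (i j : Int) (DP : List (List Int)) (T : List Int)
    (hij : i ≤ j) (hn : (j - i).toNat = n) : fA n i j DP T = f_alt i j DP T := by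
  induction n generalizing j with
  | zero =>
    have hji : i = j := by omega
    subst hji
    by_cases hd : dpGet DP i i = -1
    · have hb : bScan 0 i i DP = i :=
        bScan_stop 0 i i DP (fun h => lt_irrefl i h.1)
      simp [fA, f_alt, hd, hb,
        PySem.List.pyRange_one_eq_nil (le_refl (i + 1))]
    · simp [fA, f_alt, hd]
  | succ n ih =>
    have hlt : i < j := by omega
    by_cases hd : dpGet DP i j ≠ -1
    · simp [fA, f_alt, hd]
    · simp at hd
      have hij' : i ≠ j := by omega
      have hA : fA (n + 1) i j DP T = min (tGet T j) (fA n i (j - 1) DP T) := by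
        simp [fA, hd, hij']
      have hscan : bScan ((j - i).toNat) i j DP = bScan n i (j - 1) DP := by
        rw [hn]
        exact bScan_succ n i j DP ⟨hlt, hd⟩
      have hIH : fA n i (j - 1) DP T = f_alt i (j - 1) DP T :=
        ih (j - 1) (by omega) (by omega)
      by_cases hd' : dpGet DP i (j - 1) ≠ -1
      · -- the entry just below j is memoized: the scan stops at j - 1
        have hb : bScan n i (j - 1) DP = j - 1 := bScan_stop n i (j - 1) DP (by tauto)
        have hBalt : f_alt i (j - 1) DP T = dpGet DP i (j - 1) := by simp [f_alt, hd']
        rw [hA, hIH, hBalt]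
        simp [f_alt, hd, hscan, hb, hd',
          PySem.List.pyRange_one_singleton (a := j)]
      · -- not memoized: both sides reduce to the same scan result and fold prefix
        simp at hd'
        have hk := bScan_le n i (j - 1) DP
        have hsplit : PySem.List.pyRange (bScan n i (j - 1) DP + 1) (j + 1) 1 =
            PySem.List.pyRange (bScan n i (j - 1) DP + 1) j 1 ++ [j] := by
          have := PySem.List.pyRange_one_succ_right
            (a := bScan n i (j - 1) DP + 1) (b := j) (by omega)
          simpa using this
        rw [hA, hIH]
        simp only [f_alt, hd, hd', hscan, hsplit, ne_eq, not_true_eq_false, if_false,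
          List.foldl_append, List.foldl_cons, List.foldl_nil]
        have hn' : (j - 1 - i).toNat = n := by omega
        have hj1 : j - 1 + 1 = j := by ring
        rw [hn', hj1, min_comm]

theorem fA_memo (fuel : Nat) (i j : Int) (DP : List (List Int)) (T : List Int)
    (h : dpGet DP i j ≠ -1) : fA fuel i j DP T = dpGet DP i j := by
  cases fuel <;> simp [fA, h]

theorem f_alt_memo (i j : Int) (DP : List (List Int)) (T : List Int)
    (h : dpGet DP i j ≠ -1) : f_alt i j DP T = dpGet DP i j := by
  simp [f_alt, h]

-- ===== VERDICT (by name: the statement is the Claim_ definition above) =====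
theorem f_spec : Claim_equal_f := by
  intro i j DP T _ hpre
  show f i j DP T = f_alt i j DP T
  rcases hpre with hmemo | hb
  · have hd : dpGet DP i j ≠ -1 := by
      unfold dpGet
      cases hrow : PySem.List.pyGet? DP i with
      | none => simp [hrow] at hmemo
      | some row =>
        cases hv : PySem.List.pyGet? row j with
        | none => simp [hrow, hv] at hmemo
        | some v => simp [hrow, hv] at hmemo ⊢; exact hmemo
    rw [show f i j DP T = fA ((j - i).toNat) i j DP T from rfl,
        fA_memo _ _ _ _ _ hd, f_alt_memo _ _ _ _ hd]
  · exact fA_eq_alt ((j - i).toNat) i j DP T hb.1 rfl
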